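-- pv_equiv track=rewrite | github.com/snatesa1/snatesa1 | JPMC_Code_test/Max_words.py | find_words_with_max_char
-- ===== SOURCE A (Python) =====
-- def find_words_with_max_char(sentence, search_char):
--     if search_char.isalpha() and sentence:
--         max_count = 0
--         words_with_max_count = []
--
--         for word in sentence:
--             if word.isalnum():
--                 char_count = word.count(search_char)
--                 if char_count > max_count:
--                     max_count = char_count
--                     words_with_max_count = [word]
--                 elif char_count == max_count:
--                     words_with_max_count.append(word)
--         return (max_count, words_with_max_count[:1])
--     else:
--         return (0, [])
-- ===== SOURCE B (Python) =====
-- def find_words_with_max_char(sentence, search_char):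
--     if search_char.isalpha() and sentence:
--         pairs = [(w, w.count(search_char)) for w in sentence if w.isalnum()]
--         if not pairs:
--             return (0, [])
--         max_count = max(c for _, c in pairs)
--         first = next(w for w, c in pairs if c == max_count)
--         return (max_count, [first])
--     else:
--         return (0, [])
-- ===== Notes on version B (the rewrite author's own statement) =====
-- stated objective: simpler
-- what changed: A's single running-max scan that maintains a candidate list is replaced by a build-then-find decomposition: build the (word, count) pairs for the alnum words, take the max count, then find the first word attaining it.
import Mathlib
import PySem

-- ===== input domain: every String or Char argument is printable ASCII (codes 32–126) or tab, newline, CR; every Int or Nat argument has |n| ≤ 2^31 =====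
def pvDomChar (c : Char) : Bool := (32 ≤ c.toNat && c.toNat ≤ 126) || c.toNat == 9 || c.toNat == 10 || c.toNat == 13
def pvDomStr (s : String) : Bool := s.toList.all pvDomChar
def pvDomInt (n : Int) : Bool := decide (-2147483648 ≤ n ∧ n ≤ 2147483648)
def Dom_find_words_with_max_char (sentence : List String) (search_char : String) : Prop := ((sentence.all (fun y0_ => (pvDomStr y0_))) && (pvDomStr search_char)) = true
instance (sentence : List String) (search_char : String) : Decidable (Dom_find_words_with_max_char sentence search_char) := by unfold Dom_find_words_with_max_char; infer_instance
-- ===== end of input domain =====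

-- B replaces A's single running-max-with-candidate-list scan by a build-then-find
-- decomposition (build the (word, count) pairs, take the max, find the first achiever);
-- objective: simpler structure, same asymptotic cost.

-- ===== PORT A =====
def find_words_with_max_char (sentence : List String) (search_char : String) : Int × List String :=
  if PySem.Str.strIsalpha search_char && !sentence.isEmpty then
    let st := sentence.foldl (fun (st : Int × List String) word =>
      if PySem.Str.strIsalnum word then
        let char_count : Int := (PySem.Str.count word search_char : Int)
        if char_count > st.1 then (char_count, [word])
        else if char_count == st.1 then (st.1, st.2 ++ [word])
        else st
      else st) (0, [])
    (st.1, PySem.List.slice st.2 none (some 1))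
  else (0, [])

-- ===== PORT B =====
def find_words_with_max_char_alt (sentence : List String) (search_char : String) : Int × List String :=
  if PySem.Str.strIsalpha search_char && !sentence.isEmpty then
    let pairs : List (String × Int) :=
      (sentence.filter (fun w => PySem.Str.strIsalnum w)).map
        (fun w => (w, (PySem.Str.count w search_char : Int)))
    -- 'if not pairs: return (0, [])' then max(...); max? is none exactly when pairs is empty
    match PySem.List.max? (pairs.map Prod.snd) (fun c => c) with
    | none => (0, [])
    | some max_count =>
      -- 'next(w for w, c in pairs if c == max_count)'
      match pairs.find? (fun p => p.2 == max_count) with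
      | some p => (max_count, [p.1])
      | none => (max_count, [])   -- unreachable: max_count is attained by some pair
  else (0, [])

-- ===== PRECONDITION & SPEC =====
def Spec_find_words_with_max_char (sentence : List String) (search_char : String) (out : Int × List String) : Prop := out = find_words_with_max_char_alt sentence search_char
instance (sentence : List String) (search_char : String) (out : Int × List String) : Decidable (Spec_find_words_with_max_char sentence search_char out) := by unfold Spec_find_words_with_max_char; infer_instance

-- ===== CLAIM (what is proved, stated in full; the proofs are below) =====
def Claim_equal_find_words_with_max_char : Prop := ∀ (sentence : List String) (search_char : String), Dom_find_words_with_max_char sentence search_char → Spec_find_words_with_max_char sentence search_char (find_words_with_max_char sentence search_char)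

-- ===== LEMMAS AND PROOFS =====

/-- A's loop body, viewed on a (word, count) pair. -/
def pvStep (st : Int × List String) (p : String × Int) : Int × List String :=
  if p.2 > st.1 then (p.2, [p.1])
  else if p.2 == st.1 then (st.1, st.2 ++ [p.1])
  else st

theorem pv_le_foldl_max (l : List Int) (a : Int) : a ≤ l.foldl max a := by
  induction l generalizing a with
  | nil => simp
  | cons x t ih => exact le_trans (le_max_left a x) (ih (max a x))

theorem pv_mem_le_foldl_max (l : List Int) (a y : Int) (hy : y ∈ l) : y ≤ l.foldl max a := by
  induction l generalizing a with
  | nil => cases hy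
  | cons x t ih =>
    rcases List.mem_cons.mp hy with h | h
    · subst h; exact le_trans (le_max_right a y) (pv_le_foldl_max t _)
    · exact ih _ h

theorem pv_foldl_max_of_le (l : List Int) (a : Int) (h : ∀ y ∈ l, y ≤ a) : l.foldl max a = a := by
  induction l with
  | nil => rfl
  | cons x t ih =>
    have hx : x ≤ a := h x List.mem_cons_self
    simp only [List.foldl_cons, max_eq_left hx]
    exact ih (fun y hy => h y (List.mem_cons_of_mem _ hy))

theorem pv_foldl_max_mem (l : List Int) (a : Int) : l.foldl max a = a ∨ l.foldl max a ∈ l := by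
  induction l generalizing a with
  | nil => exact Or.inl rfl
  | cons x t ih =>
    simp only [List.foldl_cons]
    rcases ih (max a x) with h | h
    · rcases max_cases a x with ⟨he, _⟩ | ⟨he, _⟩
      · exact Or.inl (h.trans he)
      · exact Or.inr (List.mem_cons.mpr (Or.inl (h.trans he)))
    · exact Or.inr (List.mem_cons_of_mem _ h)

/-- First component of A's fold is the running max. -/
theorem pv_fst_fold (q : List (String × Int)) (m : Int) (acc : List String) :
    (q.foldl pvStep (m, acc)).1 = (q.map Prod.snd).foldl max m := by
  induction q generalizing m acc with
  | nil => rfl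
  | cons p t ih =>
    simp only [List.foldl_cons, List.map_cons, pvStep]
    split_ifs with h1 h2
    · rw [ih]; congr 1; omega
    · have h2' : p.2 = m := by simpa using h2
      rw [ih]; congr 1; omega
    · rw [ih]; congr 1; omega

/-- Head of A's candidate list: the current head survives unless some later count exceeds
the running max, in which case the head becomes the first pair attaining the final max. -/
theorem pv_head_fold (q : List (String × Int)) (m : Int) (w : String) (acc : List String) :
    (q.foldl pvStep (m, w :: acc)).2.head? =
      some (if q.any (fun p => decide (m < p.2)) then
              ((q.find? (fun p => p.2 == (q.map Prod.snd).foldl max m)).map Prod.fst).getD w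
            else w) := by
  induction q generalizing m w acc with
  | nil => simp
  | cons p t ih =>
    by_cases h1 : m < p.2
    · -- replacement step: state becomes (p.2, [p.1])
      have hstep : pvStep (m, w :: acc) p = (p.2, p.1 :: []) := by
        simp [pvStep, h1]
      have hmax : max m p.2 = p.2 := max_eq_right (le_of_lt h1)
      rw [List.foldl_cons, hstep, ih]
      have hM : ((p :: t).map Prod.snd).foldl max m = (t.map Prod.snd).foldl max p.2 := by
        simp [hmax]
      by_cases ha : t.any (fun p' => decide (p.2 < p'.2)) = true
      · -- the final max exceeds p.2, so p itself does not match the find?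
        obtain ⟨x, hxt, hxlt⟩ := List.any_eq_true.mp ha
        have hxlt' : p.2 < x.2 := of_decide_eq_true hxlt
        have hxle : x.2 ≤ (t.map Prod.snd).foldl max p.2 :=
          pv_mem_le_foldl_max _ _ _ (List.mem_map_of_mem hxt)
        have hne : (p.2 == (t.map Prod.snd).foldl max p.2) = false := by
          simp; omega
        -- find? on t succeeds: the max is attained in t
        have hattain : (t.map Prod.snd).foldl max p.2 ∈ t.map Prod.snd := by
          rcases pv_foldl_max_mem (t.map Prod.snd) p.2 with h | h
          · omega
          · exact h
        obtain ⟨x', hx't, hx'⟩ := List.mem_map.mp hattain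
        have hsome : ∃ r, t.find? (fun p' => p'.2 == (t.map Prod.snd).foldl max p.2) = some r := by
          rcases hfind : t.find? (fun p' => p'.2 == (t.map Prod.snd).foldl max p.2) with _ | r
          · exfalso
            have hx := List.find?_eq_none.mp hfind x' hx't
            rw [hx'] at hx
            simp at hx
          · exact ⟨r, hfind⟩
        obtain ⟨r, hr⟩ := hsome
        have hcons : List.find? (fun p' => p'.2 == ((p :: t).map Prod.snd).foldl max m) (p :: t)
            = List.find? (fun p' => p'.2 == (t.map Prod.snd).foldl max p.2) t := by
          rw [List.map_cons, List.foldl_cons, hmax]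
          exact List.find?_cons_of_neg (by simpa using hne)
        rw [if_pos ha, hcons, hr]
        simp [h1]
      · -- no later count exceeds p.2: the final max is p.2 and p matches first
        have hle : ∀ y ∈ t.map Prod.snd, y ≤ p.2 := by
          intro y hy
          obtain ⟨x, hxt, rfl⟩ := List.mem_map.mp hy
          have := List.any_eq_false.mp (Bool.eq_false_iff.mpr ha) x hxt
          simpa using this
        have hMp : (t.map Prod.snd).foldl max p.2 = p.2 := pv_foldl_max_of_le _ _ hle
        have hcons : List.find? (fun p' => p'.2 == ((p :: t).map Prod.snd).foldl max m) (p :: t)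
            = some p := by
          rw [List.map_cons, List.foldl_cons, hmax, hMp]
          exact List.find?_cons_of_pos (by simp)
        rw [if_neg ha, hcons]
        simp [h1]
    · -- non-replacement step: state stays (m, w :: acc') for some acc'
      have hmax : max m p.2 = m := max_eq_left (le_of_not_gt h1)
      have hM : ((p :: t).map Prod.snd).foldl max m = (t.map Prod.snd).foldl max m := by
        simp [hmax]
      have hstep : ∃ acc', pvStep (m, w :: acc) p = (m, w :: acc') := by
        by_cases h2 : p.2 = m
        · exact ⟨acc ++ [p.1], by simp [pvStep, h2]⟩
        · refine ⟨acc, ?_⟩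
          have : (p.2 == m) = false := by simpa using h2
          simp [pvStep, h1, this]
      obtain ⟨acc', hacc'⟩ := hstep
      rw [List.foldl_cons, hacc', ih]
      have hanyc : ((p :: t).any fun p' => decide (m < p'.2))
          = t.any (fun p' => decide (m < p'.2)) := by
        simp [h1]
      rw [hM, hanyc]
      by_cases ha : t.any (fun p' => decide (m < p'.2)) = true
      · obtain ⟨x, hxt, hxlt⟩ := List.any_eq_true.mp ha
        have hxlt' : m < x.2 := of_decide_eq_true hxlt
        have hxle : x.2 ≤ (t.map Prod.snd).foldl max m :=
          pv_mem_le_foldl_max _ _ _ (List.mem_map_of_mem hxt)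
        have hne : (p.2 == (t.map Prod.snd).foldl max m) = false := by
          simp; omega
        rw [if_pos ha, if_pos ha, List.find?_cons_of_neg (by simpa using hne)]
      · rw [if_neg ha, if_neg ha]

theorem pv_slice_one {α : Type} (l : List α) :
    PySem.List.slice l none (some 1) = l.take 1 := by
  simp [PySem.List.slice]

-- ===== VERDICT (by name: the statement is the Claim_ definition above) =====
theorem find_words_with_max_char_spec : Claim_equal_find_words_with_max_char := by
  intro sentence search_char _
  unfold Spec_find_words_with_max_char find_words_with_max_char find_words_with_max_char_alt
  by_cases hg : (PySem.Str.strIsalpha search_char && !sentence.isEmpty) = true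
  · rw [if_pos hg, if_pos hg]
    set pairs : List (String × Int) :=
      (sentence.filter (fun w => PySem.Str.strIsalnum w)).map
        (fun w => (w, (PySem.Str.count w search_char : Int))) with hpairs
    have hfold : sentence.foldl (fun (st : Int × List String) word =>
        if PySem.Str.strIsalnum word then
          let char_count : Int := (PySem.Str.count word search_char : Int)
          if char_count > st.1 then (char_count, [word])
          else if char_count == st.1 then (st.1, st.2 ++ [word])
          else st
        else st) (0, []) = pairs.foldl pvStep (0, []) := by
      rw [hpairs, List.foldl_map, List.foldl_filter]
      rfl
    simp only [hfold]
    rcases hp : pairs with _ | ⟨p, t⟩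
    · rfl
    · -- the first pair's count is nonnegative, so the first step yields (p.2, [p.1])
      have hp2 : 0 ≤ p.2 := by
        have : p ∈ pairs := by rw [hp]; exact List.mem_cons_self
        obtain ⟨w, _, rfl⟩ := List.mem_map.mp (hpairs ▸ this)
        exact Int.natCast_nonneg _
      have hstep0 : pvStep (0, []) p = (p.2, p.1 :: []) := by
        unfold pvStep
        split_ifs with h1 h2
        · rfl
        · have : p.2 = 0 := by simpa using h2
          simp [this]
        · exfalso
          have : ¬ p.2 = 0 := by simpa using h2
          omega
      rw [List.foldl_cons, hstep0]
      set M : Int := (t.map Prod.snd).foldl max p.2 with hMdef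
      have hmaxq : PySem.List.max? ((p :: t).map Prod.snd) (fun c => c) = some M := by
        rw [List.map_cons]
        exact PySem.List.max?_id_cons _ _
    -- components
      have hfst : (t.foldl pvStep (p.2, p.1 :: [])).1 = M := pv_fst_fold t p.2 _
      have hhead := pv_head_fold t p.2 p.1 []
      rw [hmaxq]
      dsimp only
      by_cases ha : t.any (fun p' => decide (p.2 < p'.2)) = true
      · obtain ⟨x, hxt, hxlt⟩ := List.any_eq_true.mp ha
        have hxlt' : p.2 < x.2 := of_decide_eq_true hxlt
        have hxle : x.2 ≤ M := pv_mem_le_foldl_max _ _ _ (List.mem_map_of_mem hxt)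
        have hne : (p.2 == M) = false := by simp [hMdef]; omega
        have hattain : M ∈ t.map Prod.snd := by
          rcases pv_foldl_max_mem (t.map Prod.snd) p.2 with h | h
          · exfalso; rw [← hMdef] at h; omega
          · exact hMdef ▸ h
        obtain ⟨x', hx't, hx'⟩ := List.mem_map.mp hattain
        have hsome : ∃ r, t.find? (fun p' => p'.2 == M) = some r := by
          rcases hfind : t.find? (fun p' => p'.2 == M) with _ | r
          · exfalso
            have hx := List.find?_eq_none.mp hfind x' hx't
            rw [hx'] at hx
            simp at hx
          · exact ⟨r, hfind⟩
        obtain ⟨r, hr⟩ := hsome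
        have hconsfind : List.find? (fun p' => p'.2 == M) (p :: t) = some r := by
          rw [List.find?_cons_of_neg (by simpa using hne)]; exact hr
        rw [hconsfind]
        rw [if_pos ha, ← hMdef, hr] at hhead
        simp only [Option.map_some, Option.getD_some] at hhead
        obtain ⟨ys, hys⟩ := List.head?_eq_some_iff.mp hhead
        refine Prod.ext ?_ ?_
        · simpa using hfst
        · simp [pv_slice_one, hys]
      · have hle : ∀ y ∈ t.map Prod.snd, y ≤ p.2 := by
          intro y hy
          obtain ⟨x, hxt, rfl⟩ := List.mem_map.mp hy
          have := List.any_eq_false.mp (Bool.eq_false_iff.mpr ha) x hxt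
          simpa using this
        have hMp : M = p.2 := hMdef ▸ pv_foldl_max_of_le _ _ hle
        have hconsfind : List.find? (fun p' => p'.2 == M) (p :: t) = some p :=
          List.find?_cons_of_pos (by simp [hMp])
        rw [hconsfind]
        rw [if_neg ha] at hhead
        obtain ⟨ys, hys⟩ := List.head?_eq_some_iff.mp hhead
        refine Prod.ext ?_ ?_
        · simpa using hfst
        · simp [pv_slice_one, hys]
  · rw [if_neg hg, if_neg hg]
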